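-- pv_equiv track=rewrite | github.com/resistbot/people | scripts/lint_yaml.py | compare_districts
-- ===== SOURCE A (Python) =====
-- def compare_districts(expected, actual):
--     errors = []
--
--     if expected.keys() != actual.keys():
--         errors.append(f"expected districts for {expected.keys()}, got {actual.keys()}")
--         return errors
--
--     for chamber in expected:
--         expected_districts = set(expected[chamber].keys())
--         actual_districts = set(actual[chamber].keys())
--         for district in sorted(expected_districts - actual_districts):
--             if expected[chamber][district]:
--                 errors.append(f"missing legislator for {chamber} {district}")
--         for district in sorted(actual_districts - expected_districts):
--             errors.append(f"extra legislator for unexpected seat {chamber} {district}")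
--         for district in sorted(actual_districts & expected_districts):
--             if len(actual[chamber][district]) < expected[chamber][district]:
--                 errors.append(f"missing legislator for {chamber} {district}")
--             if len(actual[chamber][district]) > expected[chamber][district]:
--                 people = "\n\t".join(actual[chamber][district])
--                 errors.append(f"extra legislator for {chamber} {district}:\n\t" + people)
--     return errors
-- ===== SOURCE B (Python) =====
-- def compare_districts(expected, actual):
--     if expected.keys() != actual.keys():
--         return [f"expected districts for {expected.keys()}, got {actual.keys()}"]
--
--     errors = []
--     for chamber, exp_counts in expected.items():
--         act = actual[chamber]
--         missing, extra_seat, both = [], [], []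
--         for district in sorted(exp_counts.keys() | act.keys()):
--             if district not in act:
--                 if exp_counts[district]:
--                     missing.append(f"missing legislator for {chamber} {district}")
--             elif district not in exp_counts:
--                 extra_seat.append(f"extra legislator for unexpected seat {chamber} {district}")
--             else:
--                 have = len(act[district])
--                 want = exp_counts[district]
--                 if have < want:
--                     both.append(f"missing legislator for {chamber} {district}")
--                 if have > want:
--                     people = "\n\t".join(act[district])
--                     both.append(f"extra legislator for {chamber} {district}:\n\t" + people)
--         errors += missing + extra_seat + both
--     return errors
-- ===== Notes on version B (the rewrite author's own statement) =====
-- stated objective: alternative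
-- what changed: Per chamber, A makes three separate passes over three sorted set expressions (expected-actual, actual-expected, intersection); B makes one pass over the sorted union of district keys, routing each district into one of three buckets (missing / extra-seat / both) and concatenating the buckets to reproduce A's grouping.
import Mathlib
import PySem

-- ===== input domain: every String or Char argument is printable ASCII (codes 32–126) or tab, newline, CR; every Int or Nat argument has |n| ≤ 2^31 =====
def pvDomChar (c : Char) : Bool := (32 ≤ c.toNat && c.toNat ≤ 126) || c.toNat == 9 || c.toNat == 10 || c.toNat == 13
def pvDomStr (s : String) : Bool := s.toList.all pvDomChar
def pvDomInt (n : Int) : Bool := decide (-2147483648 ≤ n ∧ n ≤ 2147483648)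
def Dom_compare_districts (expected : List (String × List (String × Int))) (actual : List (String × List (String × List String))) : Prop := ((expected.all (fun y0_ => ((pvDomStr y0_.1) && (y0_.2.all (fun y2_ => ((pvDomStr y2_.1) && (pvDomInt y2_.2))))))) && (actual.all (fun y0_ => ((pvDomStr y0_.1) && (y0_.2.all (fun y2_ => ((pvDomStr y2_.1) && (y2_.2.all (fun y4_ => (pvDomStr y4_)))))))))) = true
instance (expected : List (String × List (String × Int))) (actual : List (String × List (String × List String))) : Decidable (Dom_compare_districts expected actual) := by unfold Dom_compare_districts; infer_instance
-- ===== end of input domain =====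

-- B replaces A's three set-difference/intersection passes per chamber by ONE pass over the
-- sorted union of district keys that routes each district into one of three buckets
-- (objective: alternative decomposition, same asymptotic cost; return value only).

-- shared helpers: Python repr of an ASCII str (quote choice + escapes) and the
-- f-string rendering of dict_keys([...]) — the guard message is textually identical in A and B
def pyReprChars (cs : List Char) : List Char :=
  let q : Char := if cs.contains '\'' && !(cs.contains '"') then '"' else '\''
  let body := cs.flatMap (fun c =>
    if c = '\\' then ['\\', '\\']
    else if c = '\t' then ['\\', 't']
    else if c = '\n' then ['\\', 'n']
    else if c = '\r' then ['\\', 'r']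
    else if c = q then ['\\', q]
    else [c])
  (q :: body) ++ [q]

def pyReprStr (s : String) : String := String.ofList (pyReprChars s.toList)

def pvKeysView (ks : List String) : String :=
  "dict_keys([" ++ PySem.Str.join ", " (ks.map pyReprStr) ++ "])"

-- ===== PORT A =====
-- literal transliteration of Source A; expected[chamber] / actual[chamber] are only looked up
-- for chamber a key of both dicts (guard passed), so getD's default [] is never used;
-- likewise expected[chamber][district] is only looked up for district a key of that dict.
def compare_districts (expected : List (String × List (String × Int))) (actual : List (String × List (String × List String))) : List String :=
  let errors : List String := []
  let eD := PySem.Dict.mk expected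
  let aD := PySem.Dict.mk actual
  if !(PySem.Set.equal (PySem.Set.ofList eD.keys) (PySem.Set.ofList aD.keys)) then
    errors ++ ["expected districts for " ++ pvKeysView eD.keys ++ ", got " ++ pvKeysView aD.keys]
  else
    eD.keys.foldl (fun errors chamber =>
      let expC := PySem.Dict.mk (eD.getD chamber [])
      let actC := PySem.Dict.mk (aD.getD chamber [])
      let expD := PySem.Set.ofList expC.keys
      let actD := PySem.Set.ofList actC.keys
      let errors := (PySem.List.sorted (PySem.Set.diff expD actD) (fun x => x)).foldl
        (fun errors district =>
          if expC.getD district 0 != 0 then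
            errors ++ ["missing legislator for " ++ chamber ++ " " ++ district]
          else errors) errors
      let errors := (PySem.List.sorted (PySem.Set.diff actD expD) (fun x => x)).foldl
        (fun errors district =>
          errors ++ ["extra legislator for unexpected seat " ++ chamber ++ " " ++ district]) errors
      (PySem.List.sorted (PySem.Set.inter actD expD) (fun x => x)).foldl
        (fun errors district =>
          let errors := if ((actC.getD district []).length : Int) < expC.getD district 0 then
              errors ++ ["missing legislator for " ++ chamber ++ " " ++ district]
            else errors
          if ((actC.getD district []).length : Int) > expC.getD district 0 then
            errors ++ ["extra legislator for " ++ chamber ++ " " ++ district ++ ":\n\t" ++ PySem.Str.join "\n\t" (actC.getD district [])]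
          else errors) errors) errors

-- ===== PORT B =====
-- literal transliteration of Source B: one pass over sorted(union of district keys) per chamber,
-- routing each district into one of three buckets, then errors += missing + extra_seat + both
def compare_districts_alt (expected : List (String × List (String × Int))) (actual : List (String × List (String × List String))) : List String :=
  let eD := PySem.Dict.mk expected
  let aD := PySem.Dict.mk actual
  if !(PySem.Set.equal (PySem.Set.ofList eD.keys) (PySem.Set.ofList aD.keys)) then
    ["expected districts for " ++ pvKeysView eD.keys ++ ", got " ++ pvKeysView aD.keys]
  else
    eD.items.foldl (fun errors chamberCounts =>
      let chamber := chamberCounts.1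
      let expCounts := PySem.Dict.mk chamberCounts.2
      let act := PySem.Dict.mk (aD.getD chamber [])
      let buckets :=
        (PySem.List.sorted (PySem.Set.union (PySem.Set.ofList expCounts.keys) (PySem.Set.ofList act.keys)) (fun x => x)).foldl
          (fun (acc : List String × List String × List String) district =>
            if !(act.contains district) then
              (if expCounts.getD district 0 != 0 then
                 (acc.1 ++ ["missing legislator for " ++ chamber ++ " " ++ district], acc.2.1, acc.2.2)
               else acc)
            else if !(expCounts.contains district) then
              (acc.1, acc.2.1 ++ ["extra legislator for unexpected seat " ++ chamber ++ " " ++ district], acc.2.2)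
            else
              let haveN : Int := (act.getD district []).length
              let want := expCounts.getD district 0
              let both := if haveN < want then acc.2.2 ++ ["missing legislator for " ++ chamber ++ " " ++ district] else acc.2.2
              let both := if haveN > want then both ++ ["extra legislator for " ++ chamber ++ " " ++ district ++ ":\n\t" ++ PySem.Str.join "\n\t" (act.getD district [])] else both
              (acc.1, acc.2.1, both))
          ([], [], [])
      errors ++ buckets.1 ++ buckets.2.1 ++ buckets.2.2) []

-- ===== PRECONDITION & SPEC =====
-- Pre_ excludes association lists in which some dict (either level) carries a duplicate key:
-- a Python dict cannot contain duplicate keys, so such lists do not represent any input A receives.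
def Pre_compare_districts (expected : List (String × List (String × Int))) (actual : List (String × List (String × List String))) : Prop :=
  (expected.map Prod.fst).Nodup ∧ (actual.map Prod.fst).Nodup ∧
  (∀ p ∈ expected, (p.2.map Prod.fst).Nodup) ∧ (∀ p ∈ actual, (p.2.map Prod.fst).Nodup)

instance (expected : List (String × List (String × Int))) (actual : List (String × List (String × List String))) : Decidable (Pre_compare_districts expected actual) := by unfold Pre_compare_districts; infer_instance

def pvWitness_compare_districts : (List (String × List (String × Int))) × (List (String × List (String × List String))) :=
  ([("upper", [("1", 1), ("2", 0)])], [("upper", [("1", ["Alice", "Bob"])])])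

def Spec_compare_districts (expected : List (String × List (String × Int))) (actual : List (String × List (String × List String))) (out : List String) : Prop := out = compare_districts_alt expected actual
instance (expected : List (String × List (String × Int))) (actual : List (String × List (String × List String))) (out : List String) : Decidable (Spec_compare_districts expected actual out) := by unfold Spec_compare_districts; infer_instance

-- ===== CLAIM (what is proved, stated in full; the proofs are below) =====
def Claim_equal_compare_districts : Prop := ∀ (expected : List (String × List (String × Int))) (actual : List (String × List (String × List String))), Dom_compare_districts expected actual → Pre_compare_districts expected actual → Spec_compare_districts expected actual (compare_districts expected actual)

-- ===== LEMMAS AND PROOFS =====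

-- first-match lookup in a duplicate-free association list returns the member's value
theorem pv_getD_mk_eq {ν : Type} {l : List (String × ν)} (h : (l.map Prod.fst).Nodup)
    {k : String} {v : ν} (hm : (k, v) ∈ l) (d : ν) : (PySem.Dict.mk l).getD k d = v := by
  induction l with
  | nil => cases hm
  | cons q t ih =>
    simp only [List.map_cons, List.nodup_cons] at h
    rcases List.mem_cons.mp hm with hq | ht
    · subst hq
      simp [PySem.Dict.getD, PySem.Dict.get?]
    · by_cases hk : q.1 = k
      · exact absurd (hk ▸ List.mem_map.mpr ⟨(k, v), ht, rfl⟩) h.1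
      · have : (PySem.Dict.mk t).getD k d = v := ih h.2 ht
        simpa [PySem.Dict.getD, PySem.Dict.get?, List.find?_cons, hk] using this

theorem pv_contains_mk_iff {ν : Type} (l : List (String × ν)) (k : String) :
    (PySem.Dict.mk l).contains k = true ↔ k ∈ l.map Prod.fst := by
  simp only [PySem.Dict.contains, List.any_eq_true, List.mem_map, beq_iff_eq]

-- B's single routing loop, in closed form: three filtered flatMaps of the traversed list
theorem pv_foldl_route {α β : Type} (l : List α) (c1 c2 : α → Bool) (g1 g2 g3 : α → List β)
    (m e b : List β) :
    l.foldl (fun acc x =>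
        if c1 x then (acc.1 ++ g1 x, acc.2.1, acc.2.2)
        else if c2 x then (acc.1, acc.2.1 ++ g2 x, acc.2.2)
        else (acc.1, acc.2.1, acc.2.2 ++ g3 x)) (m, e, b)
      = (m ++ (l.filter c1).flatMap g1,
         e ++ (l.filter (fun x => !c1 x && c2 x)).flatMap g2,
         b ++ (l.filter (fun x => !c1 x && !c2 x)).flatMap g3) := by
  induction l generalizing m e b with
  | nil => simp
  | cons x t ih =>
    simp only [List.foldl_cons, List.filter_cons]
    by_cases h1 : c1 x
    · simp [h1, ih]
    · by_cases h2 : c2 x <;> simp [h1, h2, ih]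

-- a filter of sorted(u) is sorted(s) whenever s is the duplicate-free list of survivors
theorem pv_sorted_filter_eq (u0 s : List String) (hu : u0.Nodup) (hs : s.Nodup)
    (p : String → Bool) (hmem : ∀ x, x ∈ s ↔ x ∈ u0 ∧ p x = true) :
    (PySem.List.sorted u0 (fun x => x)).filter p = PySem.List.sorted s (fun x => x) := by
  have hnd : (PySem.List.sorted u0 (fun x => x)).Nodup :=
    ((PySem.List.sorted_perm u0 (fun x => x) false).nodup_iff).mpr hu
  have hperm : ((PySem.List.sorted u0 (fun x => x)).filter p).Perm s := by
    refine (List.perm_ext_iff_of_nodup (hnd.filter _) hs).mpr ?_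
    intro a
    simp [List.mem_filter, PySem.List.mem_sorted, hmem]
  have hpw : ((PySem.List.sorted u0 (fun x => x)).filter p).Pairwise (fun a b : String => a < b) := by
    have h1 := PySem.List.sorted_pairwise u0 (fun x => x)
    have h3 : (PySem.List.sorted u0 (fun x => x)).Pairwise (fun a b : String => a < b) :=
      (List.pairwise_and_iff.mpr ⟨h1, hnd⟩).imp (fun h => lt_of_le_of_ne h.1 h.2)
    exact List.Pairwise.sublist List.filter_sublist h3
  exact (PySem.List.sorted_eq_of_perm_of_pairwise_lt s _ (fun x => x) hperm hpw).symm

-- ===== VERDICT (by name: the statement is the Claim_ definition above) =====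
theorem compare_districts_spec : Claim_equal_compare_districts := by
  intro expected actual _hdom hpre
  obtain ⟨hne, hna, hinner, _hinna⟩ := hpre
  unfold Spec_compare_districts
  simp only [compare_districts, compare_districts_alt]
  split_ifs with hg
  · simp
  · -- main branch: outer folds over chambers
    rw [show (PySem.Dict.mk expected).keys = expected.map Prod.fst from rfl, List.foldl_map]
    refine PySem.List.foldl_congr_mem expected _ _ [] ?_
    intro errors p hp
    have hget : (PySem.Dict.mk expected).getD p.1 [] = p.2 :=
      pv_getD_mk_eq hne (by simpa using hp) []
    simp only [hget]
    set chamber := p.1 with hchamber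
    set expCounts := PySem.Dict.mk p.2 with hexpC
    set act := PySem.Dict.mk ((PySem.Dict.mk actual).getD chamber []) with hact
    set E : PySem.Set String := PySem.Set.ofList expCounts.keys with hE
    set A : PySem.Set String := PySem.Set.ofList act.keys with hA
    have hEnd : (E : List String).Nodup := PySem.Set.nodup_ofList _
    have hAnd : (A : List String).Nodup := PySem.Set.nodup_ofList _
    have hUnd : (PySem.Set.union E A : List String).Nodup := PySem.Set.nodup_union E A hEnd
    have hcontA : ∀ x, act.contains x = true ↔ x ∈ A := by
      intro x
      rw [pv_contains_mk_iff]
      simp [hA, hact, PySem.Set.mem_ofList, PySem.Dict.keys]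
    have hcontE : ∀ x, expCounts.contains x = true ↔ x ∈ E := by
      intro x
      rw [pv_contains_mk_iff]
      simp [hE, hexpC, PySem.Set.mem_ofList, PySem.Dict.keys]
    -- the three bucket index sets
    have hf1 : (PySem.List.sorted (PySem.Set.union E A) (fun x => x)).filter
        (fun d => !(act.contains d)) = PySem.List.sorted (PySem.Set.diff E A) (fun x => x) := by
      refine pv_sorted_filter_eq _ _ hUnd (PySem.Set.nodup_diff E A hEnd) _ ?_
      intro x
      simp only [PySem.Set.mem_diff, PySem.Set.mem_union, Bool.not_eq_eq_eq_not, Bool.not_true,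
        ← Bool.not_eq_true, hcontA]
      tauto
    have hf2 : (PySem.List.sorted (PySem.Set.union E A) (fun x => x)).filter
        (fun d => !(!(act.contains d)) && !(expCounts.contains d)) =
        PySem.List.sorted (PySem.Set.diff A E) (fun x => x) := by
      refine pv_sorted_filter_eq _ _ hUnd (PySem.Set.nodup_diff A E hAnd) _ ?_
      intro x
      simp only [PySem.Set.mem_diff, PySem.Set.mem_union, Bool.and_eq_true, Bool.not_not,
        Bool.not_eq_true', ← Bool.not_eq_true, hcontA, hcontE]
      tauto
    have hf3 : (PySem.List.sorted (PySem.Set.union E A) (fun x => x)).filter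
        (fun d => !(!(act.contains d)) && !(!(expCounts.contains d))) =
        PySem.List.sorted (PySem.Set.inter A E) (fun x => x) := by
      refine pv_sorted_filter_eq _ _ hUnd (PySem.Set.nodup_inter A E hAnd) _ ?_
      intro x
      simp only [PySem.Set.mem_inter, PySem.Set.mem_union, Bool.and_eq_true, Bool.not_not,
        hcontA, hcontE]
      tauto
    -- message generators
    set g1 : String → List String := fun district =>
      if expCounts.getD district 0 != 0 then
        ["missing legislator for " ++ chamber ++ " " ++ district] else [] with hg1
    set g2 : String → List String := fun district =>
      ["extra legislator for unexpected seat " ++ chamber ++ " " ++ district] with hg2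
    set g3 : String → List String := fun district =>
      (if ((act.getD district []).length : Int) < expCounts.getD district 0 then
        ["missing legislator for " ++ chamber ++ " " ++ district] else []) ++
      (if ((act.getD district []).length : Int) > expCounts.getD district 0 then
        ["extra legislator for " ++ chamber ++ " " ++ district ++ ":\n\t" ++
          PySem.Str.join "\n\t" (act.getD district [])] else []) with hg3
    -- A's three loops in closed form
    have hA1 : ∀ (acc : List String),
        (PySem.List.sorted (PySem.Set.diff E A) (fun x => x)).foldl
          (fun errors district =>
            if expCounts.getD district 0 != 0 then
              errors ++ ["missing legislator for " ++ chamber ++ " " ++ district]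
            else errors) acc
        = acc ++ (PySem.List.sorted (PySem.Set.diff E A) (fun x => x)).flatMap g1 := by
      intro acc
      rw [PySem.List.foldl_congr_mem _ _ (fun errors district => errors ++ g1 district) acc
        (by intro a x _; simp only [hg1]; split_ifs <;> simp)]
      exact PySem.List.foldl_append_eq_flatMap g1 _ acc
    have hA2 : ∀ (acc : List String),
        (PySem.List.sorted (PySem.Set.diff A E) (fun x => x)).foldl
          (fun errors district =>
            errors ++ ["extra legislator for unexpected seat " ++ chamber ++ " " ++ district]) acc
        = acc ++ (PySem.List.sorted (PySem.Set.diff A E) (fun x => x)).flatMap g2 := by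
      intro acc
      exact PySem.List.foldl_append_eq_flatMap g2 _ acc
    have hA3 : ∀ (acc : List String),
        (PySem.List.sorted (PySem.Set.inter A E) (fun x => x)).foldl
          (fun errors district =>
            let errors' := if ((act.getD district []).length : Int) < expCounts.getD district 0 then
                errors ++ ["missing legislator for " ++ chamber ++ " " ++ district]
              else errors
            if ((act.getD district []).length : Int) > expCounts.getD district 0 then
              errors' ++ ["extra legislator for " ++ chamber ++ " " ++ district ++ ":\n\t" ++
                PySem.Str.join "\n\t" (act.getD district [])]
            else errors') acc
        = acc ++ (PySem.List.sorted (PySem.Set.inter A E) (fun x => x)).flatMap g3 := by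
      intro acc
      rw [PySem.List.foldl_congr_mem _ _ (fun errors district => errors ++ g3 district) acc
        (by intro a x _; simp only [hg3]; split_ifs <;> simp)]
      exact PySem.List.foldl_append_eq_flatMap g3 _ acc
    -- B's routing loop in closed form
    have hB : (PySem.List.sorted (PySem.Set.union E A) (fun x => x)).foldl
        (fun (acc : List String × List String × List String) district =>
          if !(act.contains district) then
            (if expCounts.getD district 0 != 0 then
               (acc.1 ++ ["missing legislator for " ++ chamber ++ " " ++ district], acc.2.1, acc.2.2)
             else acc)
          else if !(expCounts.contains district) then
            (acc.1, acc.2.1 ++ ["extra legislator for unexpected seat " ++ chamber ++ " " ++ district], acc.2.2)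
          else
            let haveN : Int := (act.getD district []).length
            let want := expCounts.getD district 0
            let both := if haveN < want then acc.2.2 ++ ["missing legislator for " ++ chamber ++ " " ++ district] else acc.2.2
            let both := if haveN > want then both ++ ["extra legislator for " ++ chamber ++ " " ++ district ++ ":\n\t" ++ PySem.Str.join "\n\t" (act.getD district [])] else both
            (acc.1, acc.2.1, both)) ([], [], [])
        = ((PySem.List.sorted (PySem.Set.diff E A) (fun x => x)).flatMap g1,
           (PySem.List.sorted (PySem.Set.diff A E) (fun x => x)).flatMap g2,
           (PySem.List.sorted (PySem.Set.inter A E) (fun x => x)).flatMap g3) := by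
      rw [PySem.List.foldl_congr_mem _ _
        (fun (acc : List String × List String × List String) district =>
          if !(act.contains district) then (acc.1 ++ g1 district, acc.2.1, acc.2.2)
          else if !(expCounts.contains district) then (acc.1, acc.2.1 ++ g2 district, acc.2.2)
          else (acc.1, acc.2.1, acc.2.2 ++ g3 district)) ([], [], [])
        (by
          intro acc x _
          simp only [hg1, hg2, hg3]
          split_ifs <;> simp)]
      rw [pv_foldl_route]
      rw [hf1, hf2, hf3]
      simp
    rw [hA1, hA2, hA3, hB]
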